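-- pv_equiv track=rewrite | github.com/JoHyoju04/Algorithm | Programmers/level2/거리두기 확인하기.py | check_dist
-- ===== SOURCE A (Python) =====
-- def check_dist(r,c,cr,cc):
--     dir_m=[[0,1],[0,-1],[1,0],[-1,0],[1,1],[1,-1],[-1,1],[-1,-1],[2,0],[-2,0],[0,2],[0,-2]]
--     for a,b in dir_m:
--         nr=r+a
--         nc=c+b
--         if cr==nr and cc==nc:
--             return True
--
--     return False
-- ===== SOURCE B (Python) =====
-- def check_dist(r, c, cr, cc):
--     d = abs(cr - r) + abs(cc - c)
--     return 1 <= d <= 2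
-- ===== Notes on version B (the rewrite author's own statement) =====
-- stated objective: simpler
-- what changed: Replaces the 12-entry offset table and linear scan with a closed-form Manhattan-distance test 1 <= |cr-r|+|cc-c| <= 2.
import Mathlib
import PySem

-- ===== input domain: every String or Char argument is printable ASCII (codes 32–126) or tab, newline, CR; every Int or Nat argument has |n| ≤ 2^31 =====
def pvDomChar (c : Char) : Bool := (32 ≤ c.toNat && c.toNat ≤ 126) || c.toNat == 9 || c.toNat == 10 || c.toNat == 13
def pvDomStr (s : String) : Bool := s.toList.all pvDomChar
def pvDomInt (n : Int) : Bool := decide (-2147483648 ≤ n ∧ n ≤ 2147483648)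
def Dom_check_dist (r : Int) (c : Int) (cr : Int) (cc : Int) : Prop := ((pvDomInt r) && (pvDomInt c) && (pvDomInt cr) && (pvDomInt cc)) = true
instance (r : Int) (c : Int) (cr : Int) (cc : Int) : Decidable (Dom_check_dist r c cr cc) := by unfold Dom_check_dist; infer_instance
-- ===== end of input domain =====

-- ===== PORT A =====
-- loop over the offset table with early return, transliterated as recursion over the list
def checkDistLoop (r : Int) (c : Int) (cr : Int) (cc : Int) : List (Int × Int) → Bool
  | [] => false
  | (a, b) :: rest =>
      let nr := r + a
      let nc := c + b
      if cr == nr && cc == nc then true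
      else checkDistLoop r c cr cc rest

def check_dist (r : Int) (c : Int) (cr : Int) (cc : Int) : Bool :=
  let dir_m : List (Int × Int) :=
    [(0,1),(0,-1),(1,0),(-1,0),(1,1),(1,-1),(-1,1),(-1,-1),(2,0),(-2,0),(0,2),(0,-2)]
  checkDistLoop r c cr cc dir_m

-- ===== PORT B =====
-- B: closed-form Manhattan-distance test (simpler)
def check_dist_alt (r : Int) (c : Int) (cr : Int) (cc : Int) : Bool :=
  let d := (cr - r).natAbs + (cc - c).natAbs
  1 ≤ d && d ≤ 2

-- ===== PRECONDITION & SPEC =====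
def Spec_check_dist (r : Int) (c : Int) (cr : Int) (cc : Int) (out : Bool) : Prop := out = check_dist_alt r c cr cc
instance (r : Int) (c : Int) (cr : Int) (cc : Int) (out : Bool) : Decidable (Spec_check_dist r c cr cc out) := by unfold Spec_check_dist; infer_instance

-- ===== CLAIM (what is proved, stated in full; the proofs are below) =====
def Claim_equal_check_dist : Prop := ∀ (r : Int) (c : Int) (cr : Int) (cc : Int), Dom_check_dist r c cr cc → Spec_check_dist r c cr cc (check_dist r c cr cc)

-- ===== LEMMAS AND PROOFS =====

-- ===== VERDICT (by name: the statement is the Claim_ definition above) =====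
theorem check_dist_spec : Claim_equal_check_dist := by
  intro r c cr cc _
  unfold Spec_check_dist check_dist check_dist_alt
  rw [Bool.eq_iff_iff]
  simp only [checkDistLoop, Bool.if_true_left, Bool.or_eq_true, Bool.and_eq_true,
    beq_iff_eq, decide_eq_true_eq, Bool.false_eq_true, or_false]
  omega
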